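-- pv_equiv track=rewrite | github.com/solidaycl/advent-of-code-2019 | day4/day4.py | notPartOfLargermatching
-- ===== SOURCE A (Python) =====
-- def notPartOfLargermatching(s):
--     sequences = []
--     sequenceIndex = 0
--     i = 0
--     while(i < len(s)-1):
--         sequences.append(1);
--         while(i < len(s)-1 and s[i] == s[i+1] ):
--             sequences[sequenceIndex] += 1
--             i += 1
--         sequenceIndex += 1
--         i+=1
--     return sequences.__contains__(2)
-- ===== SOURCE B (Python) =====
-- def notPartOfLargermatching(s):
--     prev = None
--     rest = s
--     while len(rest) > 1:
--         if rest[0] == rest[1] and prev != rest[0] and (len(rest) == 2 or rest[2] != rest[0]):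
--             return True
--         prev = rest[0]
--         rest = rest[1:]
--     return False
-- ===== Notes on version B (the rewrite author's own statement) =====
-- stated objective: simpler
-- what changed: A builds the full list of run lengths with a nested while loop and then asks whether 2 is in it; B makes one early-exit pass that only remembers the previous character and reports true as soon as it sees an equal adjacent pair bounded by different characters (or the string ends) on both sides.
import Mathlib
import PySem

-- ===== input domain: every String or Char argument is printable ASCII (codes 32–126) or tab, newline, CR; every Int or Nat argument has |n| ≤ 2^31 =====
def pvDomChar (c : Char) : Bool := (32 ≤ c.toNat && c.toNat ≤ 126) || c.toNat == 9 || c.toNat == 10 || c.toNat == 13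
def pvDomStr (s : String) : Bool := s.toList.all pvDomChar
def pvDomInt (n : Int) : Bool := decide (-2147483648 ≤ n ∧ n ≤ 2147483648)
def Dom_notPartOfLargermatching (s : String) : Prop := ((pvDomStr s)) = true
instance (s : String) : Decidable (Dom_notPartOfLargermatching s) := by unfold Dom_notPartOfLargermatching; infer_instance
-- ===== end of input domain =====

-- B replaces A's nested run-length-list construction by a single early-exit pass that
-- only remembers the previous character (objective: simpler; no speed claim).

-- ===== PORT A =====
-- inner while loop: extends the current run; returns (run count, remaining suffix
-- starting at the run's last character), i.e. the state (sequences[k], s[i:]) of A.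
def pvAInner (cnt : Nat) (l : List Char) : Nat × List Char :=
  match l with
  | a :: b :: rest => if a = b then pvAInner (cnt + 1) (b :: rest) else (cnt, a :: b :: rest)
  | _ => (cnt, l)

theorem pvAInner_len (cnt : Nat) (l : List Char) : (pvAInner cnt l).2.length ≤ l.length := by
  induction l generalizing cnt with
  | nil => simp [pvAInner]
  | cons a t ih =>
      cases t with
      | nil => simp [pvAInner]
      | cons b r =>
          by_cases hab : a = b
          · simp only [pvAInner, if_pos hab]
            have := ih (cnt + 1)
            simp at this ⊢; omega
          · simp [pvAInner, hab]

theorem pvAInner_ne (cnt : Nat) (a : Char) (l : List Char) : (pvAInner cnt (a :: l)).2 ≠ [] := by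
  induction l generalizing cnt a with
  | nil => simp [pvAInner]
  | cons b r ih =>
      by_cases hab : a = b
      · simp only [pvAInner, if_pos hab]; exact ih (cnt + 1) b
      · simp [pvAInner, hab]

-- outer while loop of A: collects the run lengths (sequences)
def pvAOuter (l : List Char) : List Nat :=
  match l with
  | a :: b :: rest =>
      (pvAInner 1 (a :: b :: rest)).1 :: pvAOuter (pvAInner 1 (a :: b :: rest)).2.tail
  | _ => []
termination_by l.length
decreasing_by
  have h1 := pvAInner_len 1 (a :: b :: rest)
  have h2 := pvAInner_ne 1 a (b :: rest)
  have : 1 ≤ (pvAInner 1 (a :: b :: rest)).2.length := List.length_pos_iff.mpr h2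
  simp only [List.length_tail]
  simp only [List.length_cons] at h1 ⊢
  omega

def notPartOfLargermatching (s : String) : Bool :=
  (pvAOuter s.toList).contains 2

-- ===== PORT B =====
-- B's while loop: state (prev, rest); tests a bounded pair at the front of rest.
def pvBLoop (prev : Option Char) (l : List Char) : Bool :=
  match l with
  | a :: b :: t =>
      if a = b ∧ prev ≠ some a ∧ (t = [] ∨ t.head? ≠ some a) then true
      else pvBLoop (some a) (b :: t)
  | _ => false

def notPartOfLargermatching_alt (s : String) : Bool :=
  pvBLoop none s.toList

-- ===== PRECONDITION & SPEC =====
def Spec_notPartOfLargermatching (s : String) (out : Bool) : Prop := out = notPartOfLargermatching_alt s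
instance (s : String) (out : Bool) : Decidable (Spec_notPartOfLargermatching s out) := by unfold Spec_notPartOfLargermatching; infer_instance

-- ===== CLAIM (what is proved, stated in full; the proofs are below) =====
def Claim_equal_notPartOfLargermatching : Prop := ∀ (s : String), Dom_notPartOfLargermatching s → Spec_notPartOfLargermatching s (notPartOfLargermatching s)

-- ===== LEMMAS AND PROOFS =====

theorem pvAInner_fst_ge (cnt : Nat) (l : List Char) : cnt ≤ (pvAInner cnt l).1 := by
  induction l generalizing cnt with
  | nil => simp [pvAInner]
  | cons a t ih =>
      cases t with
      | nil => simp [pvAInner]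
      | cons b r =>
          by_cases hab : a = b
          · simp only [pvAInner, if_pos hab]
            exact Nat.le_of_succ_le (ih (cnt + 1))
          · simp [pvAInner, hab]

theorem pvAOuter_cons (a b : Char) (rest : List Char) :
    pvAOuter (a :: b :: rest) =
      (pvAInner 1 (a :: b :: rest)).1 :: pvAOuter (pvAInner 1 (a :: b :: rest)).2.tail := by
  rw [pvAOuter]

-- main joint induction: P l (boundary-ok state) and Q l (inside a run of length ≥ 3)
theorem pv_main : ∀ n l, List.length l ≤ n →
    ((∀ prev : Option Char, (∀ x : Char, prev = some x → l.head? ≠ some x) →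
        (pvAOuter l).contains 2 = pvBLoop prev l)
     ∧ (∀ (a : Char) (t : List Char) (cnt : Nat), l = a :: t → 3 ≤ cnt →
        (pvAOuter (pvAInner cnt l).2.tail).contains 2 = pvBLoop (some a) l)) := by
  intro n
  induction n with
  | zero =>
      intro l hl
      have : l = [] := List.length_eq_zero_iff.mp (Nat.le_zero.mp hl)
      subst this
      constructor
      · intro prev _; simp [pvAOuter, pvBLoop]
      · intro a t cnt h _; exact absurd h (by simp)
  | succ n ih =>
      intro l hl
      constructor
      · -- P
        intro prev hprev
        match l, hl, hprev with
        | [], _, _ => simp [pvAOuter, pvBLoop]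
        | [a], _, _ => simp [pvAOuter, pvBLoop]
        | a :: b :: rest, hl, hprev =>
          by_cases hab : a = b
          · subst hab
            by_cases hrun : rest.head? = some a
            · -- run of length ≥ 3
              cases rest with
              | nil => simp at hrun
              | cons a' rest' =>
                have ha' : a' = a := by simpa using hrun
                subst a'
                have hA : pvAInner 1 (a :: a :: a :: rest') = pvAInner 3 (a :: rest') := by
                  simp [pvAInner]
                have hge : 3 ≤ (pvAInner 3 (a :: rest')).1 := pvAInner_fst_ge 3 _
                have hQ := (ih (a :: rest') (by simp at hl ⊢; omega)).2 a rest' 3 rfl (by omega)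
                have hB : pvBLoop prev (a :: a :: a :: rest') = pvBLoop (some a) (a :: rest') := by
                  rw [show pvBLoop prev (a :: a :: a :: rest')
                        = pvBLoop (some a) (a :: a :: rest') by simp [pvBLoop]]
                  simp [pvBLoop]
                rw [hB, ← hQ, pvAOuter_cons, hA]
                simp only [List.contains_cons]
                have h2 : ((2 : Nat) == (pvAInner 3 (a :: rest')).1) = false := by
                  simp only [beq_eq_false_iff_ne, ne_eq]
                  omega
                simp [h2]
            · -- run of length exactly 2 : both sides true
              have hA : pvAInner 1 (a :: a :: rest) = (2, a :: rest) := by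
                cases rest with
                | nil => simp [pvAInner]
                | cons c r =>
                    have hac : ¬ a = c := fun h => hrun (by simp [h])
                    simp [pvAInner, hac]
              have hp : prev ≠ some a := fun h => hprev a h (by simp)
              have hBor : rest = [] ∨ rest.head? ≠ some a := by
                cases rest with
                | nil => exact Or.inl rfl
                | cons c r => exact Or.inr hrun
              rw [pvAOuter_cons, hA]
              simp [pvBLoop, hp, hBor]
          · -- a ≠ b : run of length 1
            have hba : ¬ b = a := fun h => hab h.symm
            have hA : pvAInner 1 (a :: b :: rest) = (1, a :: b :: rest) := by
              simp [pvAInner, hab]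
            have hP := (ih (b :: rest) (by simp at hl ⊢; omega)).1 (some a)
              (by intro x hx; simp at hx; subst hx; simp [hba])
            rw [pvAOuter_cons, hA]
            simp only [List.tail_cons, List.contains_cons]
            rw [hP]
            simp [pvBLoop, hab]
      · -- Q
        intro a t cnt hlat hcnt
        subst hlat
        match t, hl with
        | [], _ =>
            simp [pvAInner, pvAOuter, pvBLoop]
        | b :: t', hl =>
          by_cases hab : a = b
          · subst hab
            have hQ := (ih (a :: t') (by simp at hl ⊢; omega)).2 a t' (cnt + 1) rfl (by omega)
            have hA : pvAInner cnt (a :: a :: t') = pvAInner (cnt + 1) (a :: t') := by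
              simp [pvAInner]
            rw [hA, hQ]
            simp [pvBLoop]
          · have hba : ¬ b = a := fun h => hab h.symm
            have hA : pvAInner cnt (a :: b :: t') = (cnt, a :: b :: t') := by
              simp [pvAInner, hab]
            have hP := (ih (b :: t') (by simp at hl ⊢; omega)).1 (some a)
              (by intro x hx; simp at hx; subst hx; simp [hba])
            rw [hA]
            simp only [List.tail_cons, List.contains_cons]
            rw [hP]
            simp [pvBLoop, hab]

-- ===== VERDICT (by name: the statement is the Claim_ definition above) =====
theorem notPartOfLargermatching_spec : Claim_equal_notPartOfLargermatching := by
  intro s _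
  show notPartOfLargermatching s = notPartOfLargermatching_alt s
  exact (pv_main s.toList.length s.toList le_rfl).1 none (by simp)
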